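-- pv_equiv track=rewrite | github.com/pwinslow/sorting-cs-data-challenge | list_sorting.py | sort_list
-- ===== SOURCE A (Python) =====
-- def sort_list(lst):
--     type_idx = {}
--     for idx in range(len(lst)):
--         if lst[idx].replace("-", "").isdigit():
--             type_idx[idx] = "integer"
--         else:
--             type_idx[idx] = "word"
--
--     # Extract separate lists for word and integers from scrambled_list
--     int_list = [_int for _int in lst if _int.replace("-", "").isdigit()]
--     word_list = [word for word in lst if word.replace("-", "").isdigit() is False]
--
--     # Sort both lists, disregarding capitalization
--     int_list.sort(key=int)
--     word_list.sort(key=lambda s: s.lower())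
--
--     # Create new list and insert now sorted words/integers into same indices they occupied in scrambled_string
--     sorted_list = []
--     for idx in range(len(lst)):
--         if type_idx[idx] == "word":
--             sorted_list.append(word_list.pop(0))
--         else:
--             sorted_list.append(int_list.pop(0))
--
--     return sorted_list
-- ===== SOURCE B (Python) =====
-- def sort_list(lst):
--     # Two index-keyed scatter passes: collect positions per type, sort each
--     # group's values, and write them back at their original positions.
--     int_positions = [i for i, x in enumerate(lst) if x.replace("-", "").isdigit()]
--     word_positions = [i for i, x in enumerate(lst) if not x.replace("-", "").isdigit()]
--     sorted_ints = sorted((lst[i] for i in int_positions), key=int)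
--     sorted_words = sorted((lst[i] for i in word_positions), key=lambda s: s.lower())
--     result = list(lst)
--     for pos, val in zip(int_positions, sorted_ints):
--         result[pos] = val
--     for pos, val in zip(word_positions, sorted_words):
--         result[pos] = val
--     return result
-- ===== Notes on version B (the rewrite author's own statement) =====
-- stated objective: faster
-- what changed: Replaces the index->type dict plus pop(0)-driven sequential refill with per-type position lists and two index-keyed scatter passes that write each sorted group back at its original positions; Pre_ excludes lists containing a string that passes the digit test but that int() rejects (e.g. '--5'), where A raises ValueError.
import Mathlib
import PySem

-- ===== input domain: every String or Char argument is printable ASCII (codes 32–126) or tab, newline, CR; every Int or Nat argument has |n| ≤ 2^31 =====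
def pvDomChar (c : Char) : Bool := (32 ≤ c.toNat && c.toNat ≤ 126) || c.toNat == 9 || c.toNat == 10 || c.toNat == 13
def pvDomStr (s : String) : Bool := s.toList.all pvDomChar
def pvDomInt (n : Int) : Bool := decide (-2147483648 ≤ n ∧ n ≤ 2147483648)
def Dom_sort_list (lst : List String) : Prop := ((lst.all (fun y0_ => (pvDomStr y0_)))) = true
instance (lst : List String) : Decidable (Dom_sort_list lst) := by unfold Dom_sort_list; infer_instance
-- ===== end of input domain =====

-- B replaces A's pop(0)-driven sequential refill (quadratic) with two index-keyed
-- scatter passes over per-type position lists (sort-dominated).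

-- shared helper: the classification predicate x.replace("-", "").isdigit() (same line in both sources)
def pvIsIntStr (s : String) : Bool := PySem.Str.strIsdigit (PySem.Str.replace s "-" "")

-- shared helper: the sort key int(s); under Pre_ the parse succeeds, so getD 0 is never the raising case
def pvIntKey (s : String) : Int := (PySem.Int.ofStr? s).getD 0

-- ===== PORT A =====
def sort_list (lst : List String) : List String :=
  let type_idx : PySem.Dict Int String :=
    (PySem.List.pyRange 0 (PySem.List.len lst) 1).foldl
      (fun d idx =>
        if pvIsIntStr (PySem.List.pyGetD lst idx "") then d.insert idx "integer"
        else d.insert idx "word")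
      (PySem.Dict.mk [])
  let int_list := lst.filter (fun s => pvIsIntStr s)
  let word_list := lst.filter (fun s => pvIsIntStr s == false)
  let int_sorted := PySem.List.sorted int_list pvIntKey
  let word_sorted := PySem.List.sorted word_list (fun s => PySem.Str.lower s)
  -- pop(0) ported as head/tail; the lists are never empty where Python does not raise
  let r := (PySem.List.pyRange 0 (PySem.List.len lst) 1).foldl
    (fun (st : List String × List String × List String) idx =>
      if type_idx.getD idx "" == "word"
      then (st.1 ++ [st.2.1.head?.getD ""], st.2.1.tail, st.2.2)
      else (st.1 ++ [st.2.2.head?.getD ""], st.2.1, st.2.2.tail))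
    ([], word_sorted, int_sorted)
  r.1

-- ===== PORT B =====
def sort_list_alt (lst : List String) : List String :=
  let intPos := ((PySem.List.enumerate lst 0).filter (fun p => pvIsIntStr p.2)).map (fun p => p.1)
  let wordPos := ((PySem.List.enumerate lst 0).filter (fun p => !(pvIsIntStr p.2))).map (fun p => p.1)
  let sortedInts := PySem.List.sorted (intPos.map (fun i => PySem.List.pyGetD lst i "")) pvIntKey
  let sortedWords := PySem.List.sorted (wordPos.map (fun i => PySem.List.pyGetD lst i "")) (fun s => PySem.Str.lower s)
  let r1 := (intPos.zip sortedInts).foldl (fun r pv => PySem.List.pySetD r pv.1 pv.2) lst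
  (wordPos.zip sortedWords).foldl (fun r pv => PySem.List.pySetD r pv.1 pv.2) r1

-- ===== PRECONDITION & SPEC =====
-- Pre_ excludes exactly the lists containing a string that passes the digit test
-- but that int() rejects (e.g. "--5", "5-3"): there Python's sort key raises ValueError.
def Pre_sort_list (lst : List String) : Prop :=
  ∀ s ∈ lst, pvIsIntStr s = true → (PySem.Int.ofStr? s).isSome = true
instance (lst : List String) : Decidable (Pre_sort_list lst) := by unfold Pre_sort_list; infer_instance

def pvWitness_sort_list : List String := ["3", "b", "-1", "A"]

def Spec_sort_list (lst : List String) (out : List String) : Prop := out = sort_list_alt lst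
instance (lst : List String) (out : List String) : Decidable (Spec_sort_list lst out) := by unfold Spec_sort_list; infer_instance

-- ===== CLAIM (what is proved, stated in full; the proofs are below) =====
def Claim_equal_sort_list : Prop := ∀ (lst : List String), Dom_sort_list lst → Pre_sort_list lst → Spec_sort_list lst (sort_list lst)

-- ===== LEMMAS AND PROOFS =====

-- the common reconstruction: walk the input, consuming the sorted words/ints at the matching positions
def pvRebuild : List String → List String → List String → List String
  | [], _, _ => []
  | x :: xs, ws, is_ =>
    if pvIsIntStr x then is_.head?.getD "" :: pvRebuild xs ws is_.tail
    else ws.head?.getD "" :: pvRebuild xs ws.tail is_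

theorem pv_dict_fold_getD (g : Int → String) (ks : List Int) (d0 : PySem.Dict Int String) (x : Int) :
    (ks.foldl (fun d k => d.insert k (g k)) d0).getD x "" = if x ∈ ks then g x else d0.getD x "" := by
  induction ks generalizing d0 with
  | nil => simp
  | cons k ks ih =>
    simp only [List.foldl_cons, ih, PySem.Dict.getD_insert, List.mem_cons]
    by_cases hks : x ∈ ks <;> by_cases hk : x = k <;> simp [hks, hk]

theorem pv_loop_acc (xs ws is_ acc : List String) :
    (xs.foldl
      (fun (st : List String × List String × List String) x =>
        if pvIsIntStr x
        then (st.1 ++ [st.2.2.head?.getD ""], st.2.1, st.2.2.tail)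
        else (st.1 ++ [st.2.1.head?.getD ""], st.2.1.tail, st.2.2))
      (acc, ws, is_)).1 = acc ++ pvRebuild xs ws is_ := by
  induction xs generalizing ws is_ acc with
  | nil => simp [pvRebuild]
  | cons x xs ih =>
    rw [List.foldl_cons]
    by_cases hx : pvIsIntStr x
    · rw [if_pos hx, ih]
      simp [pvRebuild, hx]
    · rw [if_neg hx, ih]
      simp [pvRebuild, hx]

-- A computes pvRebuild of the two sorted lists
theorem pv_A_eq_rebuild (lst : List String) :
    sort_list lst
      = pvRebuild lst
          (PySem.List.sorted (lst.filter (fun s => pvIsIntStr s == false)) (fun s => PySem.Str.lower s))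
          (PySem.List.sorted (lst.filter (fun s => pvIsIntStr s)) pvIntKey) := by
  show (List.foldl
      (fun (st : List String × List String × List String) idx =>
        if (((PySem.List.pyRange 0 (PySem.List.len lst) 1).foldl
              (fun d idx =>
                if pvIsIntStr (PySem.List.pyGetD lst idx "") then d.insert idx "integer"
                else d.insert idx "word")
              (PySem.Dict.mk [])).getD idx "" == "word")
        then (st.1 ++ [st.2.1.head?.getD ""], st.2.1.tail, st.2.2)
        else (st.1 ++ [st.2.2.head?.getD ""], st.2.1, st.2.2.tail))
      ([], PySem.List.sorted (lst.filter (fun s => pvIsIntStr s == false)) (fun s => PySem.Str.lower s),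
        PySem.List.sorted (lst.filter (fun s => pvIsIntStr s)) pvIntKey)
      (PySem.List.pyRange 0 (PySem.List.len lst) 1)).1
    = pvRebuild lst
        (PySem.List.sorted (lst.filter (fun s => pvIsIntStr s == false)) (fun s => PySem.Str.lower s))
        (PySem.List.sorted (lst.filter (fun s => pvIsIntStr s)) pvIntKey)
  rw [PySem.List.foldl_congr_mem _ _
    (fun (st : List String × List String × List String) idx =>
      if pvIsIntStr (PySem.List.pyGetD lst idx "")
      then (st.1 ++ [st.2.2.head?.getD ""], st.2.1, st.2.2.tail)
      else (st.1 ++ [st.2.1.head?.getD ""], st.2.1.tail, st.2.2)) _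
    (by
      intro st idx hidx
      rw [show (fun (d : PySem.Dict Int String) (idx : Int) =>
            if pvIsIntStr (PySem.List.pyGetD lst idx "") then d.insert idx "integer"
            else d.insert idx "word")
          = (fun d idx => d.insert idx
              (if pvIsIntStr (PySem.List.pyGetD lst idx "") then "integer" else "word"))
          from by funext d idx; split <;> rfl]
      rw [pv_dict_fold_getD]
      simp only [hidx, if_pos]
      by_cases hP : pvIsIntStr (PySem.List.pyGetD lst idx "") <;> simp [hP])]
  rw [show (PySem.List.len lst) = ((lst.length : Int)) from by simp]
  rw [PySem.List.foldl_pyRange_zero_pyGetD' lst ""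
      (fun (st : List String × List String × List String) x =>
        if pvIsIntStr x
        then (st.1 ++ [st.2.2.head?.getD ""], st.2.1, st.2.2.tail)
        else (st.1 ++ [st.2.1.head?.getD ""], st.2.1.tail, st.2.2)) _]
  exact pv_loop_acc lst _ _ []

-- positions of enumerate at start s+1 are the positions at start s shifted by one
theorem pv_pos_shift (q : String → Bool) (xs : List String) (s : Int) :
    ((PySem.List.enumerate xs (s+1)).filter (fun p => q p.2)).map (fun p => p.1)
      = (((PySem.List.enumerate xs s).filter (fun p => q p.2)).map (fun p => p.1)).map (· + 1) := by
  induction xs generalizing s with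
  | nil => simp
  | cons x xs ih =>
    simp only [PySem.List.enumerate_cons, List.filter_cons]
    by_cases hx : q x
    · simp only [hx, if_true, List.map_cons]
      rw [ih]
    · simp only [hx, if_false, Bool.false_eq_true]
      rw [ih]

theorem pv_pos_nonneg (q : String → Bool) (xs : List String) (s : Int) (hs : 0 ≤ s) :
    ∀ p ∈ ((PySem.List.enumerate xs s).filter (fun p => q p.2)).map (fun p => p.1), 0 ≤ p := by
  intro p hp
  simp only [List.mem_map, List.mem_filter] at hp
  obtain ⟨pr, ⟨hmem, _⟩, rfl⟩ := hp
  rw [PySem.List.mem_enumerate_iff] at hmem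
  obtain ⟨k, hk, rfl⟩ := hmem
  simp; omega

-- the second components of the filtered enumerate are the filtered values
theorem pv_enum_snd (q : String → Bool) (xs : List String) (s : Int) :
    ((PySem.List.enumerate xs s).filter (fun p => q p.2)).map (fun p => p.2) = xs.filter q := by
  induction xs generalizing s with
  | nil => simp
  | cons x xs ih =>
    simp only [PySem.List.enumerate_cons, List.filter_cons]
    by_cases hx : q x <;> simp [hx, ih]

-- the values read back at the positions are exactly the filtered values
theorem pv_pos_values (q : String → Bool) (lst : List String) :
    (((PySem.List.enumerate lst 0).filter (fun p => q p.2)).map (fun p => p.1)).map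
        (fun i => PySem.List.pyGetD lst i "")
      = lst.filter q := by
  rw [List.map_map]
  have h1 : ∀ p ∈ (PySem.List.enumerate lst 0).filter (fun p => q p.2),
      ((fun i => PySem.List.pyGetD lst i "") ∘ (fun p => p.1)) p = p.2 := by
    intro p hp
    rw [List.mem_filter] at hp
    have hmem := hp.1
    rw [PySem.List.mem_enumerate_iff] at hmem
    obtain ⟨k, hk, rfl⟩ := hmem
    simp [List.getD_eq_getElem?_getD, hk]
  rw [List.map_congr_left h1]
  exact pv_enum_snd q lst 0

theorem pv_scatter_shift (ps : List Int) (vs : List String) (y : String) (ys : List String)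
    (hps : ∀ p ∈ ps, 0 ≤ p) :
    ((ps.map (· + 1)).zip vs).foldl (fun r pv => PySem.List.pySetD r pv.1 pv.2) (y :: ys)
      = y :: (ps.zip vs).foldl (fun r pv => PySem.List.pySetD r pv.1 pv.2) ys := by
  induction ps generalizing vs y ys with
  | nil => simp
  | cons p ps ih =>
    cases vs with
    | nil => simp
    | cons v vs =>
      have hp : 0 ≤ p := hps p (by simp)
      have hset : PySem.List.pySetD (y :: ys) (p + 1) v = y :: PySem.List.pySetD ys p v := by
        rw [PySem.List.pySetD_of_nonneg _ _ (by omega), PySem.List.pySetD_of_nonneg _ _ hp]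
        have h1 : (p + 1).toNat = p.toNat + 1 := by omega
        simp [h1]
      simp only [List.map_cons, List.zip_cons_cons, List.foldl_cons, hset]
      exact ih vs _ _ (fun q hq => hps q (by simp [hq]))

theorem pv_scatter_eq_rebuild (lst ws is_ : List String)
    (hw : ws.length = (((PySem.List.enumerate lst 0).filter (fun p => !(pvIsIntStr p.2))).map (fun p => p.1)).length)
    (hi : is_.length = (((PySem.List.enumerate lst 0).filter (fun p => pvIsIntStr p.2)).map (fun p => p.1)).length) :
    ((((PySem.List.enumerate lst 0).filter (fun p => !(pvIsIntStr p.2))).map (fun p => p.1)).zip ws).foldl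
        (fun r pv => PySem.List.pySetD r pv.1 pv.2)
        (((((PySem.List.enumerate lst 0).filter (fun p => pvIsIntStr p.2)).map (fun p => p.1)).zip is_).foldl
          (fun r pv => PySem.List.pySetD r pv.1 pv.2) lst)
      = pvRebuild lst ws is_ := by
  induction lst generalizing ws is_ with
  | nil => simp [pvRebuild]
  | cons x xs ih =>
    have hshift := pv_pos_shift (q := fun s => pvIsIntStr s) (xs := xs) (s := 0)
    have hshiftW := pv_pos_shift (q := fun s => !(pvIsIntStr s)) (xs := xs) (s := 0)
    have hnnI := pv_pos_nonneg (fun s => pvIsIntStr s) xs 0 le_rfl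
    have hnnW := pv_pos_nonneg (fun s => !(pvIsIntStr s)) xs 0 le_rfl
    by_cases hx : pvIsIntStr x
    · -- x is an int: position 0 gets the head of is_
      simp only [PySem.List.enumerate_cons, List.filter_cons, hx, Bool.not_true,
        if_true, if_false, Bool.false_eq_true, List.map_cons] at hw hi ⊢
      rw [hshift] at hi ⊢
      rw [hshiftW] at hw ⊢
      cases is_ with
      | nil => simp at hi
      | cons i0 is' =>
        simp only [List.zip_cons_cons, List.foldl_cons]
        have hset0 : PySem.List.pySetD (x :: xs) (0 : Int) i0 = i0 :: xs := by
          rw [PySem.List.pySetD_of_nonneg _ _ le_rfl]; rfl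
        rw [hset0, pv_scatter_shift _ _ _ _ hnnI, pv_scatter_shift _ _ _ _ hnnW]
        rw [ih ws is' (by simpa using hw) (by simpa using hi)]
        simp [pvRebuild, hx]
    · -- x is a word: position 0 gets the head of ws
      simp only [PySem.List.enumerate_cons, List.filter_cons, hx, Bool.not_false,
        if_true, if_false, Bool.false_eq_true, List.map_cons] at hw hi ⊢
      rw [hshift] at hi ⊢
      rw [hshiftW] at hw ⊢
      cases ws with
      | nil => simp at hw
      | cons w0 ws' =>
        rw [pv_scatter_shift _ _ _ _ hnnI]
        simp only [List.zip_cons_cons, List.foldl_cons]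
        have hset0 : ∀ (rest : List String), PySem.List.pySetD (x :: rest) (0 : Int) w0 = w0 :: rest := by
          intro rest; rw [PySem.List.pySetD_of_nonneg _ _ le_rfl]; rfl
        rw [hset0, pv_scatter_shift _ _ _ _ hnnW]
        rw [ih ws' is_ (by simpa using hw) (by simpa using hi)]
        simp [pvRebuild, hx]

-- ===== VERDICT (by name: the statement is the Claim_ definition above) =====
theorem sort_list_spec : Claim_equal_sort_list := by
  intro lst _ _
  unfold Spec_sort_list
  rw [pv_A_eq_rebuild]
  have hB : sort_list_alt lst =
      (((((PySem.List.enumerate lst 0).filter (fun p => !(pvIsIntStr p.2))).map (fun p => p.1)).zip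
          (PySem.List.sorted
            ((((PySem.List.enumerate lst 0).filter (fun p => !(pvIsIntStr p.2))).map (fun p => p.1)).map
              (fun i => PySem.List.pyGetD lst i ""))
            (fun s => PySem.Str.lower s))).foldl
        (fun r pv => PySem.List.pySetD r pv.1 pv.2)
        (((((PySem.List.enumerate lst 0).filter (fun p => pvIsIntStr p.2)).map (fun p => p.1)).zip
            (PySem.List.sorted
              ((((PySem.List.enumerate lst 0).filter (fun p => pvIsIntStr p.2)).map (fun p => p.1)).map
                (fun i => PySem.List.pyGetD lst i ""))
              pvIntKey)).foldl
          (fun r pv => PySem.List.pySetD r pv.1 pv.2) lst)) := rfl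
  have hq : (fun s => pvIsIntStr s == false) = (fun s => !(pvIsIntStr s)) := by
    funext s; cases pvIsIntStr s <;> rfl
  have hlen : ∀ (q : String → Bool),
      (((PySem.List.enumerate lst 0).filter (fun p => q p.2)).map (fun p => p.1)).length
        = (lst.filter q).length := by
    intro q
    rw [← pv_enum_snd q lst 0]
    simp
  rw [hB, pv_pos_values (fun s => pvIsIntStr s) lst, pv_pos_values (fun s => !(pvIsIntStr s)) lst]
  rw [pv_scatter_eq_rebuild lst _ _
    (by rw [PySem.List.length_sorted]; exact (hlen (fun s => !(pvIsIntStr s))).symm)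
    (by rw [PySem.List.length_sorted]; exact (hlen (fun s => pvIsIntStr s)).symm)]
  rw [hq]
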